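-- pv_equiv track=rewrite | github.com/alasdairnicol/advent-of-code-2019 | day10.py | get_vectors_for_site
-- ===== SOURCE A (Python) =====
-- from collections import defaultdict
--
-- def gcd(x, y):
--     while y != 0:
--         x, y = y, x % y
--     return x
--
-- def get_vectors_for_site(asteroids, site):
--     vectors = defaultdict(list)
--     for asteroid in asteroids:
--         if asteroid == site:
--             continue
--
--         distance = (asteroid[0] - site[0], asteroid[1] - site[1])
--
--         divisor = abs(gcd(*distance))
--         vector = (distance[0] // divisor, distance[1] // divisor)
--         vectors[vector].append(asteroid)
--     return vectors
-- ===== SOURCE B (Python) =====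
-- from collections import defaultdict
--
-- def _gcd(a, b):
--     return a if b == 0 else _gcd(b, a % b)
--
-- def get_vectors_for_site(asteroids, site):
--     def direction(p):
--         dx = p[0] - site[0]
--         dy = p[1] - site[1]
--         g = _gcd(abs(dx), abs(dy))
--         return (dx // g, dy // g)
--
--     pts = [p for p in asteroids if p != site]
--     vectors = defaultdict(list)
--     for v in dict.fromkeys(direction(p) for p in pts):
--         vectors[v] = [p for p in pts if direction(p) == v]
--     return vectors
-- ===== Notes on version B (the rewrite author's own statement) =====
-- stated objective: alternative
-- what changed: B replaces A's online defaultdict accumulation with a two-phase group-by: filter out the site, dedup the reduced direction vectors in first-occurrence order (dict.fromkeys), then build each group by filtering the asteroid list per key; the gcd is a recursive Euclid on absolute values instead of A's iterative signed one.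
import Mathlib
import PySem

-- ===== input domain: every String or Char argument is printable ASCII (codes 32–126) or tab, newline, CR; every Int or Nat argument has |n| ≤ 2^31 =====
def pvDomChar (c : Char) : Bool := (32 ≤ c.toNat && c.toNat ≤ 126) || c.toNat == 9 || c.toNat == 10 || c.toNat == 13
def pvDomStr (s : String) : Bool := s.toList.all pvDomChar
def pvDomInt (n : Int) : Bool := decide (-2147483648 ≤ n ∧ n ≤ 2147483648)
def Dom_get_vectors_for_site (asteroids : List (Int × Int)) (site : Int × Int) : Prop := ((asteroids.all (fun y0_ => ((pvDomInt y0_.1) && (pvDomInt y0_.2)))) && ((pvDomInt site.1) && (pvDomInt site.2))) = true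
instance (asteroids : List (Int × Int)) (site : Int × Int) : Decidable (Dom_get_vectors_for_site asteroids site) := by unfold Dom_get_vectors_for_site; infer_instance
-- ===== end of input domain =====

-- B groups by reduced direction via filter-then-dedup-then-per-key-filter instead of A's online defaultdict accumulation; return-value equivalence (neither mutates its arguments).


-- termination helper for both gcd ports (Python % takes the divisor's sign)
theorem pymod_natAbs_lt (x y : Int) (h : ¬ y = 0) : (PySem.Int.mod x y).natAbs < y.natAbs := by
  rcases lt_or_gt_of_ne h with hneg | hpos
  · have := PySem.Int.mod_neg_bounds x hneg; omega
  · have h1 := PySem.Int.mod_nonneg x hpos; have h2 := PySem.Int.mod_lt x hpos; omega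

-- ===== PORT A =====
-- A's iterative 'while y != 0: x, y = y, x % y' as the equivalent tail recursion on (x, y)
def pyGcd (x y : Int) : Int :=
  if h : y = 0 then x else pyGcd y (PySem.Int.mod x y)
termination_by y.natAbs
decreasing_by exact pymod_natAbs_lt x y h

def get_vectors_for_site (asteroids : List (Int × Int)) (site : Int × Int) : List (Int × Int × List (Int × Int)) :=
  let vectors : PySem.Dict (Int × Int) (List (Int × Int)) :=
    asteroids.foldl (fun d asteroid =>
      if asteroid = site then d
      else
        let distance : Int × Int := (asteroid.1 - site.1, asteroid.2 - site.2)
        let divisor : Int := |pyGcd distance.1 distance.2|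
        let vector : Int × Int := (PySem.Int.floordiv distance.1 divisor, PySem.Int.floordiv distance.2 divisor)
        d.modify vector [] (fun l => l ++ [asteroid])) PySem.Dict.empty
  -- the returned dict[(int,int), list] flattened to the required List (Int × Int × List (Int × Int))
  vectors.items.map (fun p => (p.1.1, p.1.2, p.2))

-- ===== PORT B =====
def altGcd (a b : Int) : Int :=
  if h : b = 0 then a else altGcd b (PySem.Int.mod a b)
termination_by b.natAbs
decreasing_by exact pymod_natAbs_lt a b h

def altDirection (site : Int × Int) (p : Int × Int) : Int × Int :=
  let dx : Int := p.1 - site.1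
  let dy : Int := p.2 - site.2
  let g : Int := altGcd |dx| |dy|
  (PySem.Int.floordiv dx g, PySem.Int.floordiv dy g)

def get_vectors_for_site_alt (asteroids : List (Int × Int)) (site : Int × Int) : List (Int × Int × List (Int × Int)) :=
  let pts := asteroids.filter (fun p => p != site)
  let keys := PySem.List.dedup (pts.map (altDirection site))
  keys.map (fun v => (v.1, v.2, pts.filter (fun p => altDirection site p == v)))

-- ===== PRECONDITION & SPEC =====
def Spec_get_vectors_for_site (asteroids : List (Int × Int)) (site : Int × Int) (out : List (Int × Int × List (Int × Int))) : Prop := out = get_vectors_for_site_alt asteroids site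
instance (asteroids : List (Int × Int)) (site : Int × Int) (out : List (Int × Int × List (Int × Int))) : Decidable (Spec_get_vectors_for_site asteroids site out) := by unfold Spec_get_vectors_for_site; infer_instance

-- ===== CLAIM (what is proved, stated in full; the proofs are below) =====
def Claim_equal_get_vectors_for_site : Prop := ∀ (asteroids : List (Int × Int)) (site : Int × Int), Dom_get_vectors_for_site asteroids site → Spec_get_vectors_for_site asteroids site (get_vectors_for_site asteroids site)

-- ===== LEMMAS AND PROOFS =====

theorem gcd_pymod_step (x y : Int) : Int.gcd y (PySem.Int.mod x y) = Int.gcd x y := by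
  have hm : PySem.Int.mod x y = x + y * (-(PySem.Int.floordiv x y)) := by
    have := PySem.Int.floordiv_mul_add_mod x y; ring_nf; linarith
  rw [hm, Int.gcd_add_mul_left_right, Int.gcd_comm]

theorem pyGcd_natAbs (x y : Int) : (pyGcd x y).natAbs = Int.gcd x y := by
  induction x, y using pyGcd.induct with
  | case1 x => rw [pyGcd]; simp [Int.gcd]
  | case2 x y h ih => rw [pyGcd]; simp only [h, dite_false]; rw [ih, gcd_pymod_step]

theorem altGcd_eq (a b : Int) : 0 ≤ a → 0 ≤ b → altGcd a b = (Int.gcd a b : Int) := by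
  induction a, b using altGcd.induct with
  | case1 a => intro ha _; rw [altGcd]; simp [Int.natAbs_of_nonneg ha]
  | case2 a b h ih =>
      intro ha hb
      have hbpos : 0 < b := lt_of_le_of_ne hb (Ne.symm h)
      rw [altGcd]; simp only [h, dite_false]
      rw [ih hb (PySem.Int.mod_nonneg a hbpos), gcd_pymod_step]

-- A's per-asteroid reduced vector, named for the proofs
def vecA (site : Int × Int) (a : Int × Int) : Int × Int :=
  (PySem.Int.floordiv (a.1 - site.1) |pyGcd (a.1 - site.1) (a.2 - site.2)|,
   PySem.Int.floordiv (a.2 - site.2) |pyGcd (a.1 - site.1) (a.2 - site.2)|)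

theorem altDirection_eq (site p : Int × Int) : altDirection site p = vecA site p := by
  have hg : altGcd |p.1 - site.1| |p.2 - site.2| = |pyGcd (p.1 - site.1) (p.2 - site.2)| := by
    rw [altGcd_eq _ _ (abs_nonneg _) (abs_nonneg _)]
    rw [show Int.gcd |p.1 - site.1| |p.2 - site.2| = Int.gcd (p.1 - site.1) (p.2 - site.2) from by
      unfold Int.gcd; rw [Int.natAbs_abs, Int.natAbs_abs]]
    rw [← pyGcd_natAbs, Int.abs_eq_natAbs]
  simp only [altDirection, vecA, hg]

theorem get_vectors_for_site_spec' (asteroids : List (Int × Int)) (site : Int × Int) :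
    get_vectors_for_site asteroids site = get_vectors_for_site_alt asteroids site := by
  unfold get_vectors_for_site get_vectors_for_site_alt
  dsimp only
  have hvec : altDirection site = vecA site := funext (altDirection_eq site)
  rw [hvec]
  show (asteroids.foldl (fun d a => if a = site then d else d.modify (vecA site a) [] (fun l => l ++ [a])) PySem.Dict.empty).items.map _ = _
  set pts := asteroids.filter (fun p => p != site) with hpts
  have hfold : asteroids.foldl (fun d a => if a = site then d else d.modify (vecA site a) [] (fun l => l ++ [a])) PySem.Dict.empty
      = pts.foldl (fun d a => d.modify (vecA site a) [] (fun l => l ++ [a])) PySem.Dict.empty := by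
    rw [hpts, List.foldl_filter]
    congr 1
    funext d a
    by_cases h : a = site <;> simp [h]
  rw [hfold]
  set d := pts.foldl (fun d a => d.modify (vecA site a) [] (fun l => l ++ [a])) PySem.Dict.empty with hd
  have hkeys : d.keys = PySem.Set.ofList (pts.map (vecA site)) := by
    rw [hd, PySem.Dict.keys_foldl_modify_key pts (vecA site) [] (fun _ a l => l ++ [a]),
        PySem.Dict.keys_empty, PySem.Set.update_nil_left]
  have hnodup : d.keys.Nodup := by
    rw [hd]
    exact PySem.Dict.nodup_keys_foldl_modify_key pts (vecA site) [] (fun _ a l => l ++ [a]) _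
      (by rw [PySem.Dict.keys_empty]; exact List.nodup_nil)
  have hgetD : ∀ k, d.getD k [] = pts.filter (fun p => vecA site p == k) := by
    intro k
    have hmap : d = (pts.map (fun p => (vecA site p, p))).foldl
        (fun d q => d.modify q.1 [] (fun l => l ++ [q.2])) PySem.Dict.empty := by
      rw [hd, List.foldl_map]
    rw [hmap, PySem.Dict.getD_foldl_modify_append]
    rw [List.filter_map, List.map_map]
    simp [Function.comp_def]
  rw [PySem.Dict.items_eq_map_keys d hnodup [], hkeys, List.map_map]
  have : PySem.List.dedup (pts.map (vecA site)) = PySem.Set.ofList (pts.map (vecA site)) := rfl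
  rw [this]
  apply List.map_congr_left
  intro k _
  simp [hgetD k]

-- ===== VERDICT (by name: the statement is the Claim_ definition above) =====
theorem get_vectors_for_site_spec : Claim_equal_get_vectors_for_site := by
  intro asteroids site _
  exact get_vectors_for_site_spec' asteroids site
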